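-- pv_equiv track=rewrite | github.com/leandro-emmerling/python_module04 | ex1/ft_archive_creation.py | transform_content
-- ===== SOURCE A (Python) =====
-- def transform_content(content: str) -> str:
--     lines: list[str] = content.split("\n")
--     new_lines: list[str] = []
--     for line in lines:
--         if line:
--             line += "#"
--         new_lines.append(line)
--     return "\n".join(new_lines)
-- ===== SOURCE B (Python) =====
-- def transform_content(content: str) -> str:
--     # single pass over characters; no list of lines is built
--     out = []
--     start = True  # True while the current line is still empty
--     for ch in content:
--         if ch == "\n":
--             if not start:
--                 out.append("#")
--             start = True
--         else:
--             start = False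
--         out.append(ch)
--     if not start:
--         out.append("#")
--     return "".join(out)
-- ===== Notes on version B (the rewrite author's own statement) =====
-- stated objective: simpler
-- what changed: Replaced split-into-lines / per-line loop / join with a single character-level pass that appends the hash mark before each newline (and at the end) when the current line is non-empty; no list of lines is built.
import Mathlib
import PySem

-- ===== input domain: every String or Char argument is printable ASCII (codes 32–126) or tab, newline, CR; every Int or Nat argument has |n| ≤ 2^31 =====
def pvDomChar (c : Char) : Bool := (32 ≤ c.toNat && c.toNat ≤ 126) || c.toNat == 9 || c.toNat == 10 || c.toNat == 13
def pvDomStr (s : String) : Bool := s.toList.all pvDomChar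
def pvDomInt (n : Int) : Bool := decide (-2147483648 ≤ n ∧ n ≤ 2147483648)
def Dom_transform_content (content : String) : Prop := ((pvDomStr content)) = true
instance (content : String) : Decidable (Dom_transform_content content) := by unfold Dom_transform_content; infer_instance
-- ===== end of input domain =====

-- B rewrites A's split/per-line-loop/join as one character-level pass with a "line empty so far" flag (objective: simpler).

-- ===== PORT A =====
def transform_content (content : String) : String :=
  let lines : List (List Char) := PySem.Chars.splitOn content.toList ['\n']
  let new_lines : List (List Char) :=
    lines.foldl (fun acc line =>
      let line := if line ≠ [] then line ++ ['#'] else line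
      acc ++ [line]) []
  String.ofList (PySem.Chars.join ['\n'] new_lines)

-- ===== PORT B =====
def transform_content_alt (content : String) : String :=
  let fin := content.toList.foldl
    (fun (st : List Char × Bool) ch =>
      if ch = '\n' then ((if st.2 then st.1 else st.1 ++ ['#']) ++ ['\n'], true)
      else (st.1 ++ [ch], false))
    ([], true)
  String.ofList (if fin.2 then fin.1 else fin.1 ++ ['#'])

-- ===== PRECONDITION & SPEC =====
def Spec_transform_content (content : String) (out : String) : Prop := out = transform_content_alt content
instance (content : String) (out : String) : Decidable (Spec_transform_content content out) := by unfold Spec_transform_content; infer_instance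

-- ===== CLAIM (what is proved, stated in full; the proofs are below) =====
def Claim_equal_transform_content : Prop := ∀ (content : String), Dom_transform_content content → Spec_transform_content content (transform_content content)

-- ===== LEMMAS AND PROOFS =====

-- proof-side characterisation of splitting at '\n' (cur = current piece, reversed)
def pvMsp : List Char → List Char → List (List Char)
  | [], cur => [cur.reverse]
  | c :: rest, cur => if c = '\n' then cur.reverse :: pvMsp rest [] else pvMsp rest (c :: cur)

lemma pvMsp_ne_nil (s : List Char) : ∀ cur, pvMsp s cur ≠ [] := by
  induction s with
  | nil => intro cur; simp [pvMsp]
  | cons c rest ih =>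
    intro cur
    simp only [pvMsp]
    split
    · simp
    · exact ih _

lemma pvGo_spec (fuel : Nat) (l cur : List Char) (acc : List (List Char))
    (h : l.length < fuel) :
    PySem.Chars.splitOn.go ['\n'] fuel l cur acc = acc.reverse ++ pvMsp l cur := by
  induction fuel generalizing l cur acc with
  | zero => omega
  | succ f ih =>
    cases l with
    | nil =>
      rw [PySem.Chars.splitOn.go]
      · simp [pvMsp]
      · omega
    | cons c rest =>
      rw [PySem.Chars.splitOn.go]
      by_cases hc : c = '\n'
      · have hp : List.isPrefixOf ['\n'] (c :: rest) = true := by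
          subst hc; simp [List.isPrefixOf]
        rw [if_pos hp]
        rw [ih _ _ _ (by simp at h ⊢; omega)]
        subst hc
        simp [pvMsp]
      · have hp : List.isPrefixOf ['\n'] (c :: rest) = false := by
          simp [List.isPrefixOf]
          exact fun he => (hc he.symm).elim
        rw [if_neg (by simp [hp])]
        rw [ih _ _ _ (by simp at h ⊢; omega)]
        simp [pvMsp, hc]

lemma pvSplitOn_eq (s : List Char) : PySem.Chars.splitOn s ['\n'] = pvMsp s [] := by
  unfold PySem.Chars.splitOn
  rw [pvGo_spec _ _ _ _ (by omega)]
  simp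

def pvF (l : List Char) : List Char := if l ≠ [] then l ++ ['#'] else l

lemma pvJoin_cons (a : List Char) (l : List (List Char)) (hl : l ≠ []) :
    PySem.Chars.join ['\n'] (a :: l) = a ++ '\n' :: PySem.Chars.join ['\n'] l := by
  cases l with
  | nil => exact absurd rfl hl
  | cons b t => simp [PySem.Chars.join, List.intercalate]

-- the B-side step function and final projection, named for the proof
def pvStep (st : List Char × Bool) (ch : Char) : List Char × Bool :=
  if ch = '\n' then ((if st.2 then st.1 else st.1 ++ ['#']) ++ ['\n'], true)
  else (st.1 ++ [ch], false)

def pvFin (st : List Char × Bool) : List Char := if st.2 then st.1 else st.1 ++ ['#']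

lemma pvKey (s : List Char) : ∀ (cur out : List Char),
    pvFin (s.foldl pvStep (out ++ cur.reverse, cur.isEmpty)) =
      out ++ PySem.Chars.join ['\n'] ((pvMsp s cur).map pvF) := by
  induction s with
  | nil =>
    intro cur out
    cases cur with
    | nil => simp [pvFin, pvMsp, pvF, PySem.Chars.join, List.intercalate]
    | cons c t =>
      simp [pvFin, pvMsp, pvF, PySem.Chars.join, List.intercalate]
  | cons c rest ih =>
    intro cur out
    by_cases hc : c = '\n'
    · subst hc
      have tag : (if cur.isEmpty then out ++ cur.reverse else out ++ cur.reverse ++ ['#']) =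
          out ++ pvF cur.reverse := by
        cases cur <;> simp [pvF]
      simp only [List.foldl_cons, pvStep, reduceIte]
      rw [tag]
      have h2 := ih [] (out ++ pvF cur.reverse ++ ['\n'])
      simp only [List.reverse_nil, List.append_nil, List.isEmpty_nil] at h2
      rw [h2]
      simp only [pvMsp, reduceIte, List.map_cons]
      rw [pvJoin_cons _ _ (by simp [pvMsp_ne_nil])]
      simp
    · simp only [List.foldl_cons, pvStep, if_neg hc]
      have h2 := ih (c :: cur) out
      simp only [List.reverse_cons, List.isEmpty_cons] at h2
      rw [List.append_assoc, h2]
      simp [pvMsp, hc]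

-- ===== VERDICT (by name: the statement is the Claim_ definition above) =====
theorem transform_content_spec : Claim_equal_transform_content := by
  intro content _
  unfold Spec_transform_content transform_content transform_content_alt
  dsimp only
  congr 1
  rw [pvSplitOn_eq, PySem.List.foldl_append_singleton_eq_map]
  have h := pvKey content.toList [] []
  simp only [List.reverse_nil, List.append_nil, List.isEmpty_nil, List.nil_append] at h
  rw [List.nil_append]
  exact h.symm
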